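-- pv_equiv track=rewrite | github.com/TitouanBertaux/Puissance-4 | dessin.py | remplirCoord
-- ===== SOURCE A (Python) =====
-- def remplirCoord(lst):
--     lstCoord = []
--     x = 250
--     y = 150
--     for i in range(len(lst)):
--         lstCoord.append([])
--         for n in range(len(lst[i])):
--             lstCoord[i].append((x, y))
--             x += 115
--         y += 115
--         x = 250
--
--     return lstCoord
-- ===== SOURCE B (Python) =====
-- def remplirCoord(lst):
--     # Build the x-coordinate template row once (longest row), then recursively
--     # emit each row as a slice of that template paired with its y.
--     width = max(map(len, lst), default=0)
--     xs = list(range(250, 250 + 115 * width, 115))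
--
--     def rows(rest, y):
--         if not rest:
--             return []
--         return [[(x, y) for x in xs[:len(rest[0])]]] + rows(rest[1:], y + 115)
--
--     return rows(lst, 150)
-- ===== Notes on version B (the rewrite author's own statement) =====
-- stated objective: alternative
-- what changed: Instead of A's mutable x/y cursors mutated and reset inside nested loops, B precomputes the x-coordinate template row once (range(250, 250+115*width, 115) for the longest row), then recursively emits each row as a slice of that template paired with its running y.
import Mathlib
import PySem

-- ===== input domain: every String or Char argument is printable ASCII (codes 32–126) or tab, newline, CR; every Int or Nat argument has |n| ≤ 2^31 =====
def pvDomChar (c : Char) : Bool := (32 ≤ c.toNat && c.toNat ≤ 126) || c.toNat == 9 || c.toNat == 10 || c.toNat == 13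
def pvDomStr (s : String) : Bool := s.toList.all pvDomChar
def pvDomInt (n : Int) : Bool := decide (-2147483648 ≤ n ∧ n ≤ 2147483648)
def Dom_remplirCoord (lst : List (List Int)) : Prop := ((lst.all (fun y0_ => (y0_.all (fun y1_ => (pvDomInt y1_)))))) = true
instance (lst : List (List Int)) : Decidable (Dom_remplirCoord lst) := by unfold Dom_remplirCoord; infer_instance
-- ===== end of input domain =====

-- B builds the x-coordinate template row once and recursively emits each row as a
-- slice of that template paired with its y, replacing A's mutable x/y cursor loops (alternative decomposition).

-- ===== PORT A =====
-- literal transliteration: state (lstCoord, x, y); outer loop over range(len(lst)),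
-- inner loop appends (x, y) to lstCoord[i] and advances x; then y += 115, x = 250
def remplirCoord (lst : List (List Int)) : List (List (Int × Int)) :=
  let st :=
    (PySem.List.pyRange 0 (lst.length : Int) 1).foldl
      (fun (s : List (List (Int × Int)) × Int × Int) i =>
        let acc := s.1 ++ [[]]
        let y := s.2.2
        let inner :=
          (PySem.List.pyRange 0 (((PySem.List.pyGetD lst i []).length : Int)) 1).foldl
            (fun (t : List (List (Int × Int)) × Int) _ =>
              (t.1.set i.toNat (PySem.List.pyGetD t.1 i [] ++ [(t.2, y)]), t.2 + 115))
            (acc, s.2.1)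
        (inner.1, 250, y + 115))
      ([], 250, 150)
  st.1

-- ===== PORT B =====
-- helper rows(rest, y): slice of the template xs for the head row, recursion on the tail
def rcRows (xs : List Int) : List (List Int) → Int → List (List (Int × Int))
  | [], _ => []
  | r :: rest, y =>
      ((PySem.List.slice xs none (some (r.length : Int))).map (fun x => (x, y)))
        :: rcRows xs rest (y + 115)

-- literal transliteration of Source B: width = max(map(len, lst), default=0);
-- xs = list(range(250, 250 + 115*width, 115)); return rows(lst, 150)
def remplirCoord_alt (lst : List (List Int)) : List (List (Int × Int)) :=
  let width := (PySem.List.max? (lst.map (fun r => (r.length : Int))) (fun x => x)).getD 0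
  let xs := PySem.List.pyRange 250 (250 + 115 * width) 115
  rcRows xs lst 150

-- ===== PRECONDITION & SPEC =====
def Spec_remplirCoord (lst : List (List Int)) (out : List (List (Int × Int))) : Prop := out = remplirCoord_alt lst
instance (lst : List (List Int)) (out : List (List (Int × Int))) : Decidable (Spec_remplirCoord lst out) := by unfold Spec_remplirCoord; infer_instance

-- ===== CLAIM (what is proved, stated in full; the proofs are below) =====
def Claim_equal_remplirCoord : Prop := ∀ (lst : List (List Int)), Dom_remplirCoord lst → Spec_remplirCoord lst (remplirCoord lst)

-- ===== LEMMAS AND PROOFS =====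

-- the inner loop of A: appending m cells to the last row, advancing x by 115 each step
lemma pv_inner (y : Int) (m : Nat) :
    ∀ (done : List (List (Int × Int))) (row : List (Int × Int)) (x : Int),
    (PySem.List.pyRange 0 (m : Int) 1).foldl
      (fun (t : List (List (Int × Int)) × Int) _ =>
        (t.1.set ((done.length : Int)).toNat
          (PySem.List.pyGetD t.1 (done.length : Int) [] ++ [(t.2, y)]), t.2 + 115))
      (done ++ [row], x)
    = (done ++ [row ++ (List.range m).map (fun (n : Nat) => ((x + 115 * (n : Int), y) : Int × Int))],
       x + 115 * (m : Int)) := by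
  induction m with
  | zero =>
      intro done row x
      simp [PySem.List.pyRange_one_eq_nil]
  | succ m ih =>
      intro done row x
      have hcast : ((m + 1 : Nat) : Int) = (m : Int) + 1 := by push_cast; ring
      rw [hcast, PySem.List.pyRange_one_succ_right (Int.natCast_nonneg m), List.foldl_append,
        ih done row x]
      simp only [List.foldl_cons, List.foldl_nil, Prod.mk.injEq]
      refine ⟨?_, by ring⟩
      have hget : PySem.List.pyGetD
          (done ++ [row ++ (List.range m).map (fun (n : Nat) => ((x + 115 * (n : Int), y) : Int × Int))])
          (done.length : Int) []
          = row ++ (List.range m).map (fun (n : Nat) => ((x + 115 * (n : Int), y) : Int × Int)) := by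
        simp
      rw [hget, List.set_append_right _ _ (by simp)]
      simp [List.range_succ]

-- the outer loop of A, run over enumerate with a generic starting index s
lemma pv_outer (lst : List (List Int)) :
    ∀ (s : Nat) (done : List (List (Int × Int))), done.length = s →
    (PySem.List.enumerate lst (s : Int)).foldl
      (fun (st : List (List (Int × Int)) × Int × Int) (p : Int × List Int) =>
        let acc := st.1 ++ [[]]
        let y := st.2.2
        let inner :=
          (PySem.List.pyRange 0 ((p.2.length : Int)) 1).foldl
            (fun (t : List (List (Int × Int)) × Int) _ =>
              (t.1.set p.1.toNat (PySem.List.pyGetD t.1 p.1 [] ++ [(t.2, y)]), t.2 + 115))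
            (acc, st.2.1)
        (inner.1, 250, y + 115))
      (done, 250, 150 + 115 * (s : Int))
    = (done ++ (PySem.List.enumerate lst (s : Int)).map (fun p =>
          (List.range p.2.length).map (fun (n : Nat) => ((250 + 115 * (n : Int), 150 + 115 * p.1) : Int × Int))),
       250, 150 + 115 * ((s : Int) + lst.length)) := by
  induction lst with
  | nil =>
      intro s done hd
      simp [PySem.List.enumerate_nil]
  | cons r t ih =>
      intro s done hd
      rw [PySem.List.enumerate_cons]
      simp only [List.foldl_cons]
      have hstep :
          ((PySem.List.pyRange 0 ((r.length : Int)) 1).foldl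
            (fun (u : List (List (Int × Int)) × Int) _ =>
              (u.1.set ((done.length : Int)).toNat
                (PySem.List.pyGetD u.1 (done.length : Int) [] ++ [(u.2, 150 + 115 * (s : Int))]), u.2 + 115))
            (done ++ [[]], 250))
          = (done ++ [([] : List (Int × Int)) ++ (List.range r.length).map
              (fun (n : Nat) => ((250 + 115 * (n : Int), 150 + 115 * (s : Int)) : Int × Int))],
             250 + 115 * (r.length : Int)) :=
        pv_inner (150 + 115 * (s : Int)) r.length done [] 250
      rw [hd] at hstep
      simp only [hstep]
      have hcast : (s : Int) + 1 = ((s + 1 : Nat) : Int) := by push_cast; ring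
      have h150 : (150 : Int) + 115 * (s : Int) + 115 = 150 + 115 * ((s + 1 : Nat) : Int) := by
        push_cast; ring
      rw [List.nil_append, hcast, h150,
        ih (s + 1) (done ++ [(List.range r.length).map
          (fun (n : Nat) => ((250 + 115 * (n : Int), 150 + 115 * (s : Int)) : Int × Int))]) (by simp [hd])]
      simp only [List.map_cons, Prod.mk.injEq, List.append_assoc, List.singleton_append,
        List.length_cons]
      exact ⟨trivial, trivial, by push_cast; ring⟩

-- the x-template of B in closed form
lemma pv_template (w : Nat) :
    PySem.List.pyRange 250 (250 + 115 * (w : Int)) 115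
      = (List.range w).map (fun (k : Nat) => ((250 + 115 * (k : Int)) : Int)) := by
  rw [PySem.List.pyRange_of_pos _ _ (by norm_num : (0 : Int) < 115)]
  rcases Nat.eq_zero_or_pos w with hw | hw
  · simp [hw]
  · have hlt : (250 : Int) < 250 + 115 * (w : Int) := by
      have : (1 : Int) ≤ (w : Int) := by exact_mod_cast hw
      nlinarith
    rw [if_pos hlt]
    have harith : ((250 : Int) + 115 * (w : Int) - 250 + 115 - 1) / 115 = (w : Int) := by
      have : (250 : Int) + 115 * (w : Int) - 250 + 115 - 1 = 114 + (w : Int) * 115 := by ring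
      rw [this, Int.add_mul_ediv_right _ _ (by norm_num : (115 : Int) ≠ 0)]
      norm_num
    rw [harith, Int.toNat_natCast]

-- B's recursion over the rows equals the closed-form map, given every row fits the template
lemma pv_rows (w : Nat) (lst : List (List Int)) :
    ∀ (s : Nat), (∀ r ∈ lst, r.length ≤ w) →
    rcRows ((List.range w).map (fun (k : Nat) => ((250 + 115 * (k : Int)) : Int))) lst (150 + 115 * (s : Int))
      = (PySem.List.enumerate lst (s : Int)).map (fun p =>
          (List.range p.2.length).map (fun (n : Nat) => ((250 + 115 * (n : Int), 150 + 115 * p.1) : Int × Int))) := by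
  induction lst with
  | nil => intro s _; simp [rcRows, PySem.List.enumerate_nil]
  | cons r t ih =>
      intro s hle
      rw [PySem.List.enumerate_cons]
      simp only [rcRows, List.map_cons]
      refine List.cons_eq_cons.mpr ⟨?_, ?_⟩
      · rw [PySem.List.slice_to_natCast, ← List.map_take, List.take_range,
          min_eq_left (hle r (by simp))]
        simp [List.map_map, Function.comp]
      · have hc : (150 : Int) + 115 * (s : Int) + 115 = 150 + 115 * ((s + 1 : Nat) : Int) := by
          push_cast; ring
        have hc2 : (s : Int) + 1 = ((s + 1 : Nat) : Int) := by push_cast; ring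
        rw [hc, hc2, ih (s + 1) (fun r hr => hle r (by simp [hr]))]

-- ===== VERDICT (by name: the statement is the Claim_ definition above) =====
theorem remplirCoord_spec : Claim_equal_remplirCoord := by
  intro lst _
  unfold Spec_remplirCoord remplirCoord remplirCoord_alt
  dsimp only
  -- A-side: rewrite the pyRange/pyGetD loop as a fold over enumerate, then close it
  have hA := pv_outer lst 0 [] rfl
  simp only [Nat.cast_zero, mul_zero, add_zero, zero_add, List.nil_append] at hA
  have e1 : (PySem.List.pyRange 0 (lst.length : Int) 1).foldl
      (fun (s : List (List (Int × Int)) × Int × Int) i =>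
        let acc := s.1 ++ [[]]
        let y := s.2.2
        let inner :=
          (PySem.List.pyRange 0 (((PySem.List.pyGetD lst i []).length : Int)) 1).foldl
            (fun (t : List (List (Int × Int)) × Int) _ =>
              (t.1.set i.toNat (PySem.List.pyGetD t.1 i [] ++ [(t.2, y)]), t.2 + 115))
            (acc, s.2.1)
        (inner.1, 250, y + 115))
      ([], 250, 150)
      = (PySem.List.enumerate lst 0).foldl
      (fun (st : List (List (Int × Int)) × Int × Int) (p : Int × List Int) =>
        let acc := st.1 ++ [[]]
        let y := st.2.2
        let inner :=
          (PySem.List.pyRange 0 ((p.2.length : Int)) 1).foldl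
            (fun (t : List (List (Int × Int)) × Int) _ =>
              (t.1.set p.1.toNat (PySem.List.pyGetD t.1 p.1 [] ++ [(t.2, y)]), t.2 + 115))
            (acc, st.2.1)
        (inner.1, 250, y + 115))
      ([], 250, 150) := by
    rw [PySem.List.enumerate_eq_map_pyRange (d := ([] : List Int)), List.foldl_map]
    rfl
  rw [e1, hA]
  -- B-side
  cases lst with
  | nil => simp [rcRows, PySem.List.enumerate_nil]
  | cons r t =>
      set width := (PySem.List.max? ((r :: t).map (fun r => (r.length : Int))) (fun x => x)).getD 0 with hwdef
      have hmax : PySem.List.max? ((r :: t).map (fun r => (r.length : Int))) (fun x => x)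
          = some (((t.map (fun r => (r.length : Int)))).foldl max (r.length : Int)) := by
        simpa using PySem.List.max?_id_cons (x := (r.length : Int)) (t := t.map (fun r => (r.length : Int)))
      have hwval : width = ((t.map (fun r => (r.length : Int)))).foldl max (r.length : Int) := by
        rw [hwdef, hmax]; rfl
      have hub : ∀ q ∈ (r :: t), ((q.length : Int)) ≤ width := by
        intro q hq
        have := PySem.List.max?_isMax hmax ((q.length : Int)) (by
          exact List.mem_map.mpr ⟨q, hq, rfl⟩)
        rw [hwval]; exact this
      have hw0 : 0 ≤ width := le_trans (Int.natCast_nonneg r.length) (hub r (by simp))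
      have hwn : width = ((width.toNat : Nat) : Int) := (Int.toNat_of_nonneg hw0).symm
      have hub' : ∀ q ∈ (r :: t), q.length ≤ width.toNat := by
        intro q hq
        have := hub q hq
        omega
      have hB := pv_rows width.toNat (r :: t) 0 hub'
      simp only [Nat.cast_zero, mul_zero, add_zero] at hB
      rw [hwn, pv_template width.toNat, hB]
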